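-- pv_equiv track=rewrite | github.com/c-gohlke/marias-server | game/utils.py | valid_plays
-- ===== SOURCE A (Python) =====
-- def get_card(card_val):
--     color = int((card_val - 1) / 13)
--
--     strength = card_val % 13
--     if strength == 0:  # is king
--         strength = 13
--     elif strength == 10:
--         strength = 14  # 0 is better than king
--     elif strength == 1:
--         strength = 15  # ace beats evertything
--     return [color, strength]
--
-- def valid_plays(hand, first_played_card, second_played_card, trump):
--     fcard1_info = None
--
--     fcard1_info = get_card(first_played_card)
--     fcard2_info = None
--     if second_played_card:
--         fcard2_info = get_card(second_played_card)
--
--     # check if has color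
--     hand_info = [
--         get_card(card)
--         for card in hand]
--
--     play_validity = [False for i in range(len(hand_info))]
--     same_color = [False for i in range(len(hand_info))]
--     is_trump = [False for i in range(len(hand_info))]
--
--     for i in range(len(hand_info)):
--         card = hand_info[i]
--         if card[0] == fcard1_info[0]:
--             same_color[i] = True
--             # player has color of first played card
--             # if there is a second card played (we are player 3)
--             if fcard2_info:
--                 """first 2 cards are same colour -> play higher than max,
--                 or trump"""
--                 if fcard2_info[0] == fcard1_info[0]:
--                     if card[1] > max(fcard2_info[1], fcard1_info[1]):
--                         play_validity[i] = True
--                 # player2 doesn't have colour and trumped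
--                 elif fcard2_info[0] == trump:
--                     # must play any card of initial colour
--                     play_validity[i] = True
--                 else:  # player2 played no trump or initial colour
--                     if card[1] > fcard1_info[1]:
--                         play_validity[i] = True
--             elif card[1] > fcard1_info[1]:
--                 play_validity[i] = True
--
--     if (not any(play_validity)) and any(same_color):
--         """if there are cards of the same color, but none was allowed
--         to be played in first checking round
--         than play any card of that colour"""
--         play_validity = same_color
--
--     if not any(play_validity):
--         # still no valid plays until now -> must play trump
--         for i in range(len(hand_info)):
--             card = hand_info[i]
--             if card[0] == trump:
--                 is_trump[i] = True
--                 if (not fcard2_info or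
--                     (fcard2_info[0] == trump and card[1] > fcard2_info[1])
--                         or not trump == fcard2_info[0]):
--                     """we are player 2, our card is trump and first card
--                     is not trump
--                     -> play any trump
--                     we are player 3, first card is not trump and player2
--                     didn't play trump. We don't have first cards color
--                     (else would have resolved round 1)
--                     -> play any trump
--                     we are player 3, first card is not trump and player 2
--                     played trump. We know player 1 didn't play trump or
--                     else valid plays would have resolved in first round
--                     (same colour) we know current player(3) doesn't have
--                     first played card's colour, or it would have
--                     resolved in round1
--                     -> we play any trump higher than player2's trump
--                     """
--                     play_validity[i] = True
--
--     if not any(play_validity) and any(is_trump):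
--         """none of the trumps we have were allowed during round3 of
--         validation checks (means player 2 played trump bigger than any
--         we have), but we must still play trump because we don't have
--         player 1s color -> play any trump"""
--         play_validity = is_trump
--
--     if not any(play_validity):
--         """still no valid plays untill now -> we have no trump
--         or cards of initial colour
--         -> play anything"""
--         play_validity = [True for i in range(len(hand))]
--
--     return play_validity
-- ===== SOURCE B (Python) =====
-- def valid_plays(hand, first_played_card, second_played_card, trump):
--     # Each card gets one priority category:
--     #   0 = same colour as the lead and beats it, 1 = same colour,
--     #   2 = trump allowed to be played, 3 = trump, 4 = anything else.
--     # The legal cards are exactly those whose category equals the best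
--     # (smallest) category present in the hand; this is correct because a
--     # tier's mask, whenever it is the first non-empty one, contains exactly
--     # the cards of that category.
--     def info(v):
--         color = int((v - 1) / 13)
--         strength = v % 13
--         if strength == 0:
--             strength = 13
--         elif strength == 10:
--             strength = 14
--         elif strength == 1:
--             strength = 15
--         return color, strength
--
--     fc, fs = info(first_played_card)
--     second = info(second_played_card) if second_played_card else None
--
--     def cat(color, strength):
--         if color == fc:
--             if second is None:
--                 return 0 if strength > fs else 1
--             sc, ss = second
--             if sc == fc:
--                 return 0 if strength > max(ss, fs) else 1
--             if sc == trump: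
--                 return 0
--             return 0 if strength > fs else 1
--         if color == trump:
--             if second is None:
--                 return 2
--             sc, ss = second
--             return 2 if (sc == trump and strength > ss) or sc != trump else 3
--         return 4
--
--     cats = [cat(*info(card)) for card in hand]
--     best = 4
--     for x in cats:
--         if x < best:
--             best = x
--     return [x == best for x in cats]
-- ===== Notes on version B (the rewrite author's own statement) =====
-- stated objective: simpler
-- what changed: A mutates three parallel boolean arrays in index loops and patches the result with a chain of any() fallback rounds; B assigns each card a single priority category (0 same-colour beater, 1 same colour, 2 playable trump, 3 trump, 4 other) and returns the argmin selection [cat == min(cats)], with no masks and no fallbacks.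
import Mathlib
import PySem

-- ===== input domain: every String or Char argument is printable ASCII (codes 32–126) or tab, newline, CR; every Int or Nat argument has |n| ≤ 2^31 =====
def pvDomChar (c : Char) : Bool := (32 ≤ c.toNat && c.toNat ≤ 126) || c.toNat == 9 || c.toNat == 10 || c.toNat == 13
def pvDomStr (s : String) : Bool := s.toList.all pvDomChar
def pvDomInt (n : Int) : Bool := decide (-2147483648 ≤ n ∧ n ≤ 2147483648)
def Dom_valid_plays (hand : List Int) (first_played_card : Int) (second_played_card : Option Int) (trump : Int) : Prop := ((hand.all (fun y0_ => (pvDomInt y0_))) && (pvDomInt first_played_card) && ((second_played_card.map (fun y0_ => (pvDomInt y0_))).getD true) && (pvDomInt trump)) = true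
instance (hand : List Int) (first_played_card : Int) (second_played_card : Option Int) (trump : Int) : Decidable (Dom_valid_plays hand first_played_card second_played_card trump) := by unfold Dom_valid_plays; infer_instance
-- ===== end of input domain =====

-- B replaces A's staged mutation of parallel boolean masks with repeated any() fallbacks by a
-- single priority category per card plus an argmin selection (objective: simpler decomposition).

-- ===== PORT A =====
-- get_card: Python's `int((card_val-1)/13)` is float true division followed by int()
-- truncation toward zero; on the |n| ≤ 2^31 domain the float quotient is exactly rounded
-- and the true quotient is never closer than 1/13 to a different integer, so the result
-- equals truncated integer division Int.tdiv (exact on this domain).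
-- `card_val % 13` is Python floor-mod = PySem.Int.mod.
def get_card (card_val : Int) : Int × Int :=
  let color := Int.tdiv (card_val - 1) 13
  let strength := PySem.Int.mod card_val 13
  let strength := if strength = 0 then 13
    else if strength = 10 then 14
    else if strength = 1 then 15
    else strength
  (color, strength)

-- body of A's first `for i in range(len(hand_info))` loop; state = (play_validity, same_color)
def stepA1 (hand_info : List (Int × Int)) (fcard1_info : Int × Int)
    (fcard2_info : Option (Int × Int)) (trump : Int)
    (st : List Bool × List Bool) (i : Nat) : List Bool × List Bool :=
  let card := hand_info.getD i (0, 0)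
  if card.1 = fcard1_info.1 then
    let same_color := st.2.set i true
    let play_validity :=
      match fcard2_info with
      | some f2 =>
        if f2.1 = fcard1_info.1 then
          if card.2 > max f2.2 fcard1_info.2 then st.1.set i true else st.1
        else if f2.1 = trump then st.1.set i true
        else if card.2 > fcard1_info.2 then st.1.set i true else st.1
      | none => if card.2 > fcard1_info.2 then st.1.set i true else st.1
    (play_validity, same_color)
  else st

-- body of A's trump loop; state = (play_validity, is_trump)
def stepA2 (hand_info : List (Int × Int)) (fcard2_info : Option (Int × Int)) (trump : Int)
    (st : List Bool × List Bool) (i : Nat) : List Bool × List Bool :=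
  let card := hand_info.getD i (0, 0)
  if card.1 = trump then
    let is_trump := st.2.set i true
    let play_validity :=
      if (match fcard2_info with
          | none => true
          | some f2 => (decide (f2.1 = trump) && decide (card.2 > f2.2)) || !decide (trump = f2.1))
      then st.1.set i true else st.1
    (play_validity, is_trump)
  else st

def valid_plays (hand : List Int) (first_played_card : Int) (second_played_card : Option Int) (trump : Int) : List Bool :=
  let fcard1_info := get_card first_played_card
  -- `if second_played_card:` — Python truthiness: None and 0 both count as no second card
  let fcard2_info : Option (Int × Int) :=
    match second_played_card with
    | some v => if v = 0 then none else some (get_card v)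
    | none => none
  let hand_info := hand.map get_card
  let n := hand_info.length
  let play_validity := List.replicate n false
  let same_color := List.replicate n false
  let is_trump := List.replicate n false
  let st := (List.range n).foldl (stepA1 hand_info fcard1_info fcard2_info trump)
    (play_validity, same_color)
  let play_validity := st.1
  let same_color := st.2
  let play_validity :=
    if (!play_validity.any id) && same_color.any id then same_color else play_validity
  let st2 :=
    if !play_validity.any id then
      (List.range n).foldl (stepA2 hand_info fcard2_info trump) (play_validity, is_trump)
    else (play_validity, is_trump)
  let play_validity := st2.1
  let is_trump := st2.2
  let play_validity :=
    if (!play_validity.any id) && is_trump.any id then is_trump else play_validity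
  if !play_validity.any id then List.replicate hand.length true else play_validity

-- ===== PORT B =====
def card_info (card_val : Int) : Int × Int :=
  let color := Int.tdiv (card_val - 1) 13
  let strength := PySem.Int.mod card_val 13
  let strength := if strength = 0 then 13
    else if strength = 10 then 14
    else if strength = 1 then 15
    else strength
  (color, strength)

-- Source B's `cat`: the priority category of one hand card
def catB (fi : Int × Int) (second : Option (Int × Int)) (trump : Int) (c : Int × Int) : Nat :=
  if c.1 = fi.1 then
    match second with
    | none => if c.2 > fi.2 then 0 else 1
    | some sec =>
      if sec.1 = fi.1 then (if c.2 > max sec.2 fi.2 then 0 else 1)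
      else if sec.1 = trump then 0
      else if c.2 > fi.2 then 0 else 1
  else if c.1 = trump then
    match second with
    | none => 2
    | some sec =>
      if (decide (sec.1 = trump) && decide (c.2 > sec.2)) || !decide (sec.1 = trump) then 2 else 3
  else 4

def valid_plays_alt (hand : List Int) (first_played_card : Int) (second_played_card : Option Int) (trump : Int) : List Bool :=
  let fi := card_info first_played_card
  let second : Option (Int × Int) :=
    match second_played_card with
    | some v => if v = 0 then none else some (card_info v)
    | none => none
  let cats := hand.map (fun card => catB fi second trump (card_info card))
  let best := cats.foldl (fun m x => if x < m then x else m) 4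
  cats.map (fun x => decide (x = best))

-- ===== PRECONDITION & SPEC =====
def Spec_valid_plays (hand : List Int) (first_played_card : Int) (second_played_card : Option Int) (trump : Int) (out : List Bool) : Prop := out = valid_plays_alt hand first_played_card second_played_card trump
instance (hand : List Int) (first_played_card : Int) (second_played_card : Option Int) (trump : Int) (out : List Bool) : Decidable (Spec_valid_plays hand first_played_card second_played_card trump out) := by unfold Spec_valid_plays; infer_instance

-- ===== CLAIM =====
def Claim_equal_valid_plays : Prop := ∀ (hand : List Int) (first_played_card : Int) (second_played_card : Option Int) (trump : Int), Dom_valid_plays hand first_played_card second_played_card trump → Spec_valid_plays hand first_played_card second_played_card trump (valid_plays hand first_played_card second_played_card trump)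

-- ===== LEMMAS AND PROOFS =====
-- the boolean predicates (per hand card) that the two loops of A compute
def predSame (fi : Int × Int) (c : Int × Int) : Bool := decide (c.1 = fi.1)
def predBeat (fi : Int × Int) (f2 : Option (Int × Int)) (t : Int) (c : Int × Int) : Bool :=
  decide (c.1 = fi.1) &&
    (match f2 with
     | none => decide (c.2 > fi.2)
     | some sec =>
       if sec.1 = fi.1 then decide (c.2 > max sec.2 fi.2)
       else if sec.1 = t then true
       else decide (c.2 > fi.2))
def predTrump (t : Int) (c : Int × Int) : Bool := decide (c.1 = t)
def predTrumpOk (f2 : Option (Int × Int)) (t : Int) (c : Int × Int) : Bool :=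
  decide (c.1 = t) &&
    (match f2 with
     | none => true
     | some sec => (decide (sec.1 = t) && decide (c.2 > sec.2)) || !decide (sec.1 = t))

lemma foldl_set_map {α : Type} (xs : List α) (d : α) (p : α → Bool) (n : Nat)
    (hn : n ≤ xs.length) :
    (List.range n).foldl
      (fun (acc : List Bool) i => if p (xs.getD i d) then acc.set i true else acc)
      (List.replicate xs.length false)
    = (xs.take n).map p ++ List.replicate (xs.length - n) false := by
  induction n with
  | zero => simp
  | succ m ih =>
    have hm : m ≤ xs.length := Nat.le_of_succ_le hn
    have hmlt : m < xs.length := hn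
    have hget : xs.getD m d = xs[m] := by
      rw [List.getD_eq_getElem?_getD, List.getElem?_eq_getElem hmlt]; rfl
    have hrep : List.replicate (xs.length - m) false
        = false :: List.replicate (xs.length - (m + 1)) false := by
      have : xs.length - m = (xs.length - (m + 1)) + 1 := by omega
      rw [this, List.replicate_succ]
    have htake : xs.take (m + 1) = xs.take m ++ [xs[m]] :=
      List.take_succ_eq_append_getElem hmlt
    rw [List.range_succ, List.foldl_append, ih hm]
    simp only [List.foldl_cons, List.foldl_nil, hget, hrep, htake, List.map_append,
      List.map_singleton, List.append_assoc, List.singleton_append]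
    by_cases hp : p xs[m]
    · simp [hp, Nat.min_eq_left hm]
    · simp [hp]

lemma stepA1_eq (hi : List (Int × Int)) (fi : Int × Int) (f2 : Option (Int × Int)) (t : Int) :
    stepA1 hi fi f2 t = fun st i =>
      ((fun acc i => if predBeat fi f2 t (hi.getD i (0, 0)) then acc.set i true else acc) st.1 i,
       (fun acc i => if predSame fi (hi.getD i (0, 0)) then acc.set i true else acc) st.2 i) := by
  funext st i
  simp only [stepA1, predBeat, predSame]
  generalize hi.getD i (0, 0) = c
  by_cases hc : c.1 = fi.1
  · cases f2 with
    | none => simp [hc]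
    | some sec =>
      simp [hc]
      by_cases h1 : sec.1 = fi.1 <;> by_cases h2 : sec.1 = t <;>
        try (split_ifs <;> simp_all <;> omega)
  · simp [hc]

lemma stepA2_eq (hi : List (Int × Int)) (f2 : Option (Int × Int)) (t : Int) :
    stepA2 hi f2 t = fun st i =>
      ((fun acc i => if predTrumpOk f2 t (hi.getD i (0, 0)) then acc.set i true else acc) st.1 i,
       (fun acc i => if predTrump t (hi.getD i (0, 0)) then acc.set i true else acc) st.2 i) := by
  funext st i
  simp only [stepA2, predTrumpOk, predTrump]
  generalize hi.getD i (0, 0) = c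
  by_cases hc : c.1 = t
  · cases f2 with
    | none => simp [hc]
    | some sec =>
      have hcomm : decide (t = sec.1) = decide (sec.1 = t) := by simp [eq_comm]
      by_cases h1 : sec.1 = t <;> simp [hc, h1, hcomm]
  · simp [hc]

lemma foldl_pair_split {σ τ ι : Type} (l : List ι) (f : σ → ι → σ) (g : τ → ι → τ)
    (a : σ) (b : τ) :
    l.foldl (fun st i => (f st.1 i, g st.2 i)) (a, b) = (l.foldl f a, l.foldl g b) := by
  induction l generalizing a b with
  | nil => rfl
  | cons x xs ih => simpa using ih (f a x) (g b x)

lemma loop1_eq (hi : List (Int × Int)) (fi : Int × Int) (f2 : Option (Int × Int)) (t : Int) :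
    (List.range hi.length).foldl (stepA1 hi fi f2 t)
      (List.replicate hi.length false, List.replicate hi.length false)
    = (hi.map (predBeat fi f2 t), hi.map (predSame fi)) := by
  rw [stepA1_eq]
  refine (foldl_pair_split (List.range hi.length)
      (fun acc i => if predBeat fi f2 t (hi.getD i (0, 0)) then acc.set i true else acc)
      (fun acc i => if predSame fi (hi.getD i (0, 0)) then acc.set i true else acc)
      (List.replicate hi.length false) (List.replicate hi.length false)).trans ?_
  · rw [foldl_set_map hi (0,0) (predBeat fi f2 t) hi.length (Nat.le_refl _),
      foldl_set_map hi (0,0) (predSame fi) hi.length (Nat.le_refl _)]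
    simp

lemma loop2_eq (hi : List (Int × Int)) (f2 : Option (Int × Int)) (t : Int) :
    (List.range hi.length).foldl (stepA2 hi f2 t)
      (List.replicate hi.length false, List.replicate hi.length false)
    = (hi.map (predTrumpOk f2 t), hi.map (predTrump t)) := by
  rw [stepA2_eq]
  refine (foldl_pair_split (List.range hi.length)
      (fun acc i => if predTrumpOk f2 t (hi.getD i (0, 0)) then acc.set i true else acc)
      (fun acc i => if predTrump t (hi.getD i (0, 0)) then acc.set i true else acc)
      (List.replicate hi.length false) (List.replicate hi.length false)).trans ?_
  · rw [foldl_set_map hi (0,0) (predTrumpOk f2 t) hi.length (Nat.le_refl _),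
      foldl_set_map hi (0,0) (predTrump t) hi.length (Nat.le_refl _)]
    simp

lemma any_false_eq_replicate (l : List Bool) (h : l.any id = false) :
    l = List.replicate l.length false := by
  induction l with
  | nil => rfl
  | cons a t ih =>
    simp only [List.any_cons, Bool.or_eq_false_iff, id] at h
    rw [List.length_cons, List.replicate_succ, ih h.2, h.1]
    simp

-- catB expressed through A's four per-card predicates
lemma catB_eq (fi : Int × Int) (f2 : Option (Int × Int)) (t : Int) (c : Int × Int) :
    catB fi f2 t c =
      if predBeat fi f2 t c then 0 else if predSame fi c then 1
      else if predTrumpOk f2 t c then 2 else if predTrump t c then 3 else 4 := by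
  simp only [catB, predBeat, predSame, predTrumpOk, predTrump]
  by_cases hs : c.1 = fi.1
  · cases f2 with
    | none => by_cases h : c.2 > fi.2 <;> simp [hs, h]
    | some sec =>
      by_cases h1 : sec.1 = fi.1
      · by_cases h : c.2 > max sec.2 fi.2 <;> simp [hs, h1, h]
      · by_cases h2 : sec.1 = t
        · simp [hs, h2, show ¬ t = fi.1 from fun h => h1 (h2.trans h)]
        · by_cases h : c.2 > fi.2 <;> simp [hs, h1, h2, h]
  · by_cases ht : c.1 = t
    · have hnf : ¬ t = fi.1 := fun h => hs (ht.trans h)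
      cases f2 with
      | none => simp [ht, hnf]
      | some sec =>
        by_cases ho : (decide (sec.1 = t) && decide (c.2 > sec.2)) || !decide (sec.1 = t) <;>
          simp [ht, hnf, ho]
    · simp [hs, ht]

lemma beat_imp_same (fi : Int × Int) (f2 : Option (Int × Int)) (t : Int) (c : Int × Int)
    (hs : predSame fi c = false) : predBeat fi f2 t c = false := by
  simp only [predBeat]
  rw [show (decide (c.1 = fi.1)) = predSame fi c from rfl, hs]
  simp

-- the fold in B computes the least category (given a member attaining the bound)
lemma fmin_le_init (l : List Nat) (a : Nat) :
    l.foldl (fun m x => if x < m then x else m) a ≤ a := by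
  induction l generalizing a with
  | nil => simp
  | cons x xs ih =>
    simp only [List.foldl_cons]
    exact le_trans (ih _) (by split_ifs <;> omega)

lemma fmin_ge (l : List Nat) (a k : Nat) (ha : k ≤ a) (hl : ∀ x ∈ l, k ≤ x) :
    k ≤ l.foldl (fun m x => if x < m then x else m) a := by
  induction l generalizing a with
  | nil => simpa
  | cons x xs ih =>
    simp only [List.foldl_cons]
    refine ih _ ?_ (fun y hy => hl y (List.mem_cons_of_mem _ hy))
    have := hl x (List.mem_cons_self)
    split_ifs <;> omega

lemma fmin_le_mem (l : List Nat) : ∀ (a x : Nat), x ∈ l →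
    l.foldl (fun m x => if x < m then x else m) a ≤ x := by
  induction l with
  | nil => intro a x hx; cases hx
  | cons y ys ih =>
    intro a x hx
    simp only [List.foldl_cons]
    rcases List.mem_cons.mp hx with h | h
    · subst h
      exact le_trans (fmin_le_init _ _) (by split_ifs <;> omega)
    · exact ih _ _ h

lemma fmin_eq (l : List Nat) (k : Nat) (hk : k ≤ 4) (hmem : k ∈ l) (hlb : ∀ x ∈ l, k ≤ x) :
    l.foldl (fun m x => if x < m then x else m) 4 = k :=
  le_antisymm (fmin_le_mem l 4 k hmem) (fmin_ge l 4 k hk hlb)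

lemma fmin_all4 (l : List Nat) (h : ∀ x ∈ l, x = 4) :
    l.foldl (fun m x => if x < m then x else m) 4 = 4 := by
  induction l with
  | nil => rfl
  | cons x xs ih =>
    have hx := h x (List.mem_cons_self)
    simp only [List.foldl_cons, hx]
    exact ih (fun y hy => h y (List.mem_cons_of_mem _ hy))

lemma any_map_true {a : Type} (l : List a) (p : a → Bool)
    (h : (l.map p).any id = true) : ∃ c ∈ l, p c = true := by
  rw [List.any_map] at h
  exact List.any_eq_true.mp h

lemma any_map_false {a : Type} (l : List a) (p : a → Bool)
    (h : (l.map p).any id = false) : ∀ c ∈ l, p c = false := by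
  rw [List.any_map] at h
  intro c hc
  exact Bool.eq_false_iff.mpr (List.any_eq_false.mp h c hc)

-- ===== VERDICT (by name: the statement is the Claim_ definition above) =====
theorem valid_plays_spec : Claim_equal_valid_plays := by
  intro hand f s t hdom
  clear hdom
  unfold Spec_valid_plays valid_plays valid_plays_alt
  dsimp only
  have hcg : card_info = get_card := rfl
  rw [hcg]
  rw [show hand.map (fun card => catB (get_card f)
        (match s with
         | some v => if v = 0 then none else some (get_card v)
         | none => none) t (get_card card))
      = (hand.map get_card).map (catB (get_card f)
        (match s with
         | some v => if v = 0 then none else some (get_card v)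
         | none => none) t) by rw [List.map_map]; rfl]
  rw [show hand.length = (hand.map get_card).length by simp]
  generalize get_card f = fi
  generalize (match s with
     | some v => if v = 0 then none else some (get_card v)
     | none => none : Option (Int × Int)) = f2
  generalize hand.map get_card = hi
  rw [loop1_eq hi fi f2 t, List.map_map]
  set best := ((hi.map (catB fi f2 t)).foldl (fun m x => if x < m then x else m) 4) with hbest
  by_cases h1 : (hi.map (predBeat fi f2 t)).any id
  · -- some same-colour beater exists: best = 0
    obtain ⟨c0, hc0, hb0⟩ := any_map_true hi _ h1
    have hb : best = 0 := by
      rw [hbest]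
      refine fmin_eq _ 0 (by omega) ?_ (fun x _ => Nat.zero_le x)
      exact List.mem_map.mpr ⟨c0, hc0, by rw [catB_eq, hb0]; rfl⟩
    rw [hb]
    clear hb hbest
    simp only [h1, Bool.not_true, Bool.false_and, Bool.false_eq_true, if_false]
    refine List.map_congr_left (fun c _ => ?_)
    simp only [Function.comp]
    rw [catB_eq]
    split_ifs <;> simp_all
  · have h1' : (hi.map (predBeat fi f2 t)).any id = false := by simpa using h1
    have hall1 : ∀ c ∈ hi, predBeat fi f2 t c = false := any_map_false hi _ h1'
    by_cases h2 : (hi.map (predSame fi)).any id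
    · -- same-colour card exists but none beats: best = 1
      obtain ⟨c0, hc0, hs0⟩ := any_map_true hi _ h2
      have hb : best = 1 := by
        rw [hbest]
        refine fmin_eq _ 1 (by omega) ?_ ?_
        · refine List.mem_map.mpr ⟨c0, hc0, ?_⟩
          rw [catB_eq, hall1 c0 hc0, hs0]
          rfl
        · intro x hx
          obtain ⟨c, hc, rfl⟩ := List.mem_map.mp hx
          rw [catB_eq, hall1 c hc]
          split_ifs <;> first | omega | simp_all
      rw [hb]
      clear hb hbest
      simp only [h1', h2, Bool.not_false, Bool.not_true, Bool.and_true,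
        Bool.false_and, Bool.false_eq_true, if_true, if_false]
      refine List.map_congr_left (fun c hc => ?_)
      simp only [Function.comp]
      rw [catB_eq, hall1 c hc]
      split_ifs <;> simp_all
    · have h2' : (hi.map (predSame fi)).any id = false := by simpa using h2
      have hall2 : ∀ c ∈ hi, predSame fi c = false := any_map_false hi _ h2'
      have hM1r : hi.map (predBeat fi f2 t) = List.replicate hi.length false := by
        have := any_false_eq_replicate _ h1'
        rwa [List.length_map] at this
      rw [hM1r]
      simp only [h2', List.any_replicate, ite_self, Bool.and_false,
        Bool.false_eq_true, if_false, id, Bool.not_false, if_true]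
      rw [loop2_eq hi f2 t]
      by_cases h3 : (hi.map (predTrumpOk f2 t)).any id
      · -- a playable trump exists (and no same-colour card): best = 2
        obtain ⟨c0, hc0, ho0⟩ := any_map_true hi _ h3
        have hb : best = 2 := by
          rw [hbest]
          refine fmin_eq _ 2 (by omega) ?_ ?_
          · refine List.mem_map.mpr ⟨c0, hc0, ?_⟩
            rw [catB_eq, beat_imp_same fi f2 t c0 (hall2 c0 hc0), hall2 c0 hc0, ho0]
            rfl
          · intro x hx
            obtain ⟨c, hc, rfl⟩ := List.mem_map.mp hx
            rw [catB_eq, beat_imp_same fi f2 t c (hall2 c hc), hall2 c hc]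
            split_ifs <;> first | omega | simp_all
        rw [hb]
        clear hb hbest
        simp only [h3, Bool.not_true, Bool.false_and, Bool.false_eq_true, if_false]
        refine List.map_congr_left (fun c hc => ?_)
        simp only [Function.comp]
        rw [catB_eq, beat_imp_same fi f2 t c (hall2 c hc), hall2 c hc]
        split_ifs <;> simp_all
      · have h3' : (hi.map (predTrumpOk f2 t)).any id = false := by simpa using h3
        have hall3 : ∀ c ∈ hi, predTrumpOk f2 t c = false := any_map_false hi _ h3'
        by_cases h4 : (hi.map (predTrump t)).any id
        · -- trumps exist but none playable: best = 3
          obtain ⟨c0, hc0, ht0⟩ := any_map_true hi _ h4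
          have hb : best = 3 := by
            rw [hbest]
            refine fmin_eq _ 3 (by omega) ?_ ?_
            · refine List.mem_map.mpr ⟨c0, hc0, ?_⟩
              rw [catB_eq, beat_imp_same fi f2 t c0 (hall2 c0 hc0), hall2 c0 hc0,
                hall3 c0 hc0, ht0]
              rfl
            · intro x hx
              obtain ⟨c, hc, rfl⟩ := List.mem_map.mp hx
              rw [catB_eq, beat_imp_same fi f2 t c (hall2 c hc), hall2 c hc, hall3 c hc]
              split_ifs <;> first | omega | simp_all
          rw [hb]
          clear hb hbest
          simp only [h3', h4, Bool.not_false, Bool.not_true, Bool.and_true,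
            Bool.false_eq_true, if_true, if_false]
          refine List.map_congr_left (fun c hc => ?_)
          simp only [Function.comp]
          rw [catB_eq, beat_imp_same fi f2 t c (hall2 c hc), hall2 c hc, hall3 c hc]
          split_ifs <;> simp_all
        · -- nothing matches: best = 4, everything allowed
          have h4' : (hi.map (predTrump t)).any id = false := by simpa using h4
          have hall4 : ∀ c ∈ hi, predTrump t c = false := any_map_false hi _ h4'
          have hb : best = 4 := by
            rw [hbest]
            refine fmin_all4 _ ?_
            intro x hx
            obtain ⟨c, hc, rfl⟩ := List.mem_map.mp hx
            rw [catB_eq, beat_imp_same fi f2 t c (hall2 c hc), hall2 c hc, hall3 c hc,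
              hall4 c hc]
            rfl
          rw [hb]
          clear hb hbest
          simp only [h3', h4', Bool.and_false, Bool.false_eq_true, if_false, Bool.not_false,
            if_true]
          symm
          rw [List.eq_replicate_iff]
          refine ⟨by simp, ?_⟩
          intro b hbmem
          obtain ⟨c, hc, rfl⟩ := List.mem_map.mp hbmem
          simp only [Function.comp]
          rw [catB_eq, beat_imp_same fi f2 t c (hall2 c hc), hall2 c hc, hall3 c hc, hall4 c hc]
          simp
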